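-- pv_equiv track=rewrite | github.com/vincentx1908/pythondailychallenge | 20260227/matrixshift.py | shift_matrix
-- ===== SOURCE A (Python) =====
-- def shift_matrix(matrix, shift):
--     rows = len(matrix)
--     cols = len(matrix[0])
--     total = rows * cols
--
--     flat = [num for row in matrix for num in row]
--
--     shift %= total
--     shifted = flat[-shift:] + flat[:-shift]
--
--     new_matrix = []
--     for i in range(0, total, cols):
--         new_matrix.append(shifted[i:i+cols])
--
--     return new_matrix
-- ===== SOURCE B (Python) =====
-- def shift_matrix(matrix, shift):
--     rows = len(matrix)
--     cols = len(matrix[0])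
--     shift %= rows * cols
--
--     # rotate right by `shift` via the classic triple reversal, in place
--     buf = [x for row in matrix for x in row]
--     buf.reverse()
--     buf[:shift] = reversed(buf[:shift])
--     buf[shift:] = reversed(buf[shift:])
--
--     # emit the rows by consuming the buffer
--     out = []
--     for _ in range(rows):
--         out.append(buf[:cols])
--         del buf[:cols]
--     return out
-- ===== Notes on version B (the rewrite author's own statement) =====
-- stated objective: alternative
-- what changed: B rotates by the classic in-place triple reversal (reverse the whole flat buffer, then re-reverse its first `shift` and remaining segments) instead of concatenating two slices, and emits the rows by destructively consuming the buffer (take cols, delete cols) instead of slicing a rotated copy at computed offsets.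
import Mathlib
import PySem

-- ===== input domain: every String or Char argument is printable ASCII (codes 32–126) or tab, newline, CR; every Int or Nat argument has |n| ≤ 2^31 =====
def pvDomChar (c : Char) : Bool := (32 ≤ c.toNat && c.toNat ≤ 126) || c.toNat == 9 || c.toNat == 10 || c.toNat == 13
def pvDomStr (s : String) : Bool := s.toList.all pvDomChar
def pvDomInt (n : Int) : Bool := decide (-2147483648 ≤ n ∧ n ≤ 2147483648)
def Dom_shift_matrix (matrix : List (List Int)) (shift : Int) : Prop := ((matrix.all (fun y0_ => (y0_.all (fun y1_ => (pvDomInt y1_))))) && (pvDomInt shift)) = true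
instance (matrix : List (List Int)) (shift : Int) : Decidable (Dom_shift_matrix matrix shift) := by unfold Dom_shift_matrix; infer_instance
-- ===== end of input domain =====

-- B rotates the flat buffer by the classic triple reversal instead of concatenating two slices,
-- and emits rows by destructively consuming the buffer instead of slicing a rotated copy at
-- computed offsets (objective: alternative algorithm, same cost).

-- ===== PORT A =====
def shift_matrix (matrix : List (List Int)) (shift : Int) : List (List Int) :=
  let rows : Int := matrix.length
  let cols : Int := (matrix.headI).length          -- matrix[0]; Pre_ excludes matrix = [] (IndexError)
  let total : Int := rows * cols
  let flat : List Int := matrix.flatMap (fun row => row)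
  let shift2 : Int := PySem.Int.mod shift total    -- shift %= total; Pre_ excludes total = 0 (ZeroDivisionError)
  let shifted : List Int :=
    PySem.List.slice flat (some (-shift2)) none ++ PySem.List.slice flat none (some (-shift2))
  (PySem.List.pyRange 0 total cols).foldl
    (fun acc i => acc ++ [PySem.List.slice shifted (some i) (some (i + cols))]) []

-- ===== PORT B =====
def shift_matrix_alt (matrix : List (List Int)) (shift : Int) : List (List Int) :=
  let rows : Int := matrix.length
  let cols : Int := (matrix.headI).length          -- matrix[0]; raises as in A on matrix = []
  let shift2 : Int := PySem.Int.mod shift (rows * cols)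
  let buf0 : List Int := (matrix.flatMap (fun row => row)).reverse   -- buf.reverse()
  -- buf[:shift] = reversed(buf[:shift])  (slice assignment replaces the prefix in place)
  let buf1 : List Int := (PySem.List.slice buf0 none (some shift2)).reverse ++
    PySem.List.slice buf0 (some shift2) none
  -- buf[shift:] = reversed(buf[shift:])
  let buf2 : List Int := PySem.List.slice buf1 none (some shift2) ++
    (PySem.List.slice buf1 (some shift2) none).reverse
  -- for _ in range(rows): out.append(buf[:cols]); del buf[:cols]
  ((PySem.List.pyRange 0 rows 1).foldl
    (fun st _i => (st.1 ++ [PySem.List.slice st.2 none (some cols)],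
                   PySem.List.slice st.2 (some cols) none))
    (([] : List (List Int)), buf2)).1

-- ===== PRECONDITION & SPEC =====
-- Pre_ excludes exactly the inputs where the Python A raises: an empty matrix (IndexError on
-- matrix[0]) and an empty first row (total = 0, so 'shift %= total' raises ZeroDivisionError).
def Pre_shift_matrix (matrix : List (List Int)) (shift : Int) : Prop :=
  matrix ≠ [] ∧ matrix.headI ≠ []
instance (matrix : List (List Int)) (shift : Int) : Decidable (Pre_shift_matrix matrix shift) := by
  unfold Pre_shift_matrix; infer_instance

def pvWitness_shift_matrix : List (List Int) × Int := ([[1, 2], [3, 4]], 1)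

def Spec_shift_matrix (matrix : List (List Int)) (shift : Int) (out : List (List Int)) : Prop := out = shift_matrix_alt matrix shift
instance (matrix : List (List Int)) (shift : Int) (out : List (List Int)) : Decidable (Spec_shift_matrix matrix shift out) := by unfold Spec_shift_matrix; infer_instance

-- ===== CLAIM (what is proved, stated in full; the proofs are below) =====
def Claim_equal_shift_matrix : Prop := ∀ (matrix : List (List Int)) (shift : Int), Dom_shift_matrix matrix shift → Pre_shift_matrix matrix shift → Spec_shift_matrix matrix shift (shift_matrix matrix shift)

-- ===== LEMMAS AND PROOFS =====

-- clampIdx at a negated in-range natural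
theorem clamp_neg (n K : Nat) (hK : K ≤ n) :
    PySem.List.clampIdx n (-(K : Int)) = if K = 0 then 0 else n - K := by
  unfold PySem.List.clampIdx; split_ifs <;> omega

-- clampIdx at a negated out-of-range natural
theorem clamp_neg_big (n K : Nat) (hK : n < K) :
    PySem.List.clampIdx n (-(K : Int)) = 0 := by
  unfold PySem.List.clampIdx; split_ifs <;> omega

-- the two-slice rotation of A equals the triple reversal of B
theorem rot_eq (flat : List Int) (s : Int) (hs : 0 ≤ s) :
    PySem.List.slice ((PySem.List.slice flat.reverse none (some s)).reverse ++
          PySem.List.slice flat.reverse (some s) none) none (some s) ++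
        (PySem.List.slice ((PySem.List.slice flat.reverse none (some s)).reverse ++
          PySem.List.slice flat.reverse (some s) none) (some s) none).reverse =
      PySem.List.slice flat (some (-s)) none ++ PySem.List.slice flat none (some (-s)) := by
  obtain ⟨st, rfl⟩ : ∃ st : Nat, s = (st : Int) := ⟨s.toNat, (Int.toNat_of_nonneg hs).symm⟩
  simp only [PySem.List.slice_to_natCast, PySem.List.slice_from_natCast]
  rw [PySem.List.slice_some_none,
    show PySem.List.slice flat none (some (-(st : Int))) =
        flat.take (PySem.List.clampIdx flat.length (-(st : Int))) from by simp [PySem.List.slice]]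
  rcases Nat.lt_or_ge flat.length st with hbig | hle
  · -- the shift exceeds the flat length: both sides are just flat
    rw [clamp_neg_big _ _ hbig,
      List.take_of_length_le (by simp; omega),
      List.drop_of_length_le (by simp; omega)]
    simp only [List.append_nil, List.drop_zero, List.take_zero]
    rw [List.take_of_length_le (by simp; omega),
      List.drop_of_length_le (by simp; omega)]
    simp
  · rw [clamp_neg _ _ hle]
    by_cases h0 : st = 0
    · subst h0
      simp
    · rw [if_neg h0]
      have hlen : ((flat.reverse.take st).reverse).length = st := by
        simp [Nat.min_eq_left (by simpa using hle)]
      have htk : (((flat.reverse.take st).reverse ++ flat.reverse.drop st).take st)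
          = (flat.reverse.take st).reverse := by
        rw [List.take_append_of_le_length (by omega)]
        exact List.take_of_length_le (by omega)
      have hdr : (((flat.reverse.take st).reverse ++ flat.reverse.drop st).drop st)
          = flat.reverse.drop st := by
        rw [List.drop_append_of_le_length (by omega), List.drop_of_length_le (by omega),
          List.nil_append]
      rw [htk, hdr, List.take_reverse, List.drop_reverse, List.reverse_reverse,
        List.reverse_reverse]

-- emitting rows by consuming the buffer is chunking it at multiples of the width
theorem chunk_fold (Cn Rn : Nat) (acc : List (List Int)) (buf : List Int) :
    ((List.range Rn).foldl (fun st (_k : Nat) =>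
        (st.1 ++ [PySem.List.slice st.2 none (some (Cn : Int))],
         PySem.List.slice st.2 (some (Cn : Int)) none)) (acc, buf))
    = (acc ++ (List.range Rn).map (fun i => (buf.drop (Cn * i)).take Cn),
       buf.drop (Cn * Rn)) := by
  induction Rn with
  | zero => simp
  | succ n ih =>
    rw [List.range_succ, List.foldl_append, ih, List.foldl_cons, List.foldl_nil,
      PySem.List.slice_to_natCast, PySem.List.slice_from_natCast, List.drop_drop,
      show Cn * n + Cn = Cn * (n + 1) by ring]
    simp [List.map_append, List.append_assoc]

-- ===== VERDICT (by name: the statement is the Claim_ definition above) =====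
theorem shift_matrix_spec : Claim_equal_shift_matrix := by
  intro matrix shift _ hpre
  obtain ⟨hne, hrow⟩ := hpre
  unfold Spec_shift_matrix
  simp only [shift_matrix, shift_matrix_alt]
  have hR : 0 < matrix.length := List.length_pos_of_ne_nil hne
  have hC : 0 < (matrix.headI).length := List.length_pos_of_ne_nil hrow
  have htot : (0 : Int) < (matrix.length : Int) * ((matrix.headI).length : Int) := by
    exact_mod_cast Nat.mul_pos hR hC
  set R := matrix.length with hRdef
  set C := (matrix.headI).length with hCdef
  set s := PySem.Int.mod shift ((R : Int) * (C : Int)) with hsdef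
  have hs0 : 0 ≤ s := PySem.Int.mod_nonneg _ htot
  rw [rot_eq (matrix.flatMap (fun row => row)) s hs0]
  set SH := PySem.List.slice (matrix.flatMap (fun row => row)) (some (-s)) none ++
    PySem.List.slice (matrix.flatMap (fun row => row)) none (some (-s)) with hSHdef
  -- A side: the stride-C range fold is a map over the row indices
  rw [PySem.List.foldl_append_singleton_eq_map, List.nil_append]
  rw [PySem.List.pyRange_of_pos 0 _ (show (0 : Int) < (C : Int) by exact_mod_cast hC)]
  have hif : (if (0 : Int) < (R : Int) * (C : Int) then
      (((R : Int) * (C : Int) - 0 + (C : Int) - 1) / (C : Int)).toNat else 0) = R := by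
    rw [if_pos (by exact_mod_cast Nat.mul_pos hR hC)]
    have h1 : ((R : Int) * (C : Int) - 0 + (C : Int) - 1) = ((C : Int) - 1) + (R : Int) * (C : Int) := by ring
    rw [h1, Int.add_mul_ediv_right _ _ (show (C : Int) ≠ 0 by exact_mod_cast hC.ne')]
    rw [Int.ediv_eq_zero_of_lt (by omega) (by omega)]
    simp
  rw [hif, PySem.List.pyRange_one 0 (R : Int), show ((R : Int) - 0).toNat = R by omega,
    List.map_map]
  -- B side: the consuming fold is the chunking map
  rw [List.foldl_map, chunk_fold C R [] SH, List.nil_append]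
  apply List.map_congr_left
  intro k hk
  simp only [Function.comp_apply, zero_add]
  rw [show (C : Int) * (k : Nat) = ((C * k : Nat) : Int) by push_cast; ring,
    PySem.List.slice_natCast_add]
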